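-- pv_equiv track=rewrite | github.com/DorenCalliku/comorbid-graphs | comorbid_graphs/processable/label_handler_mixin.py | group_lol_stats
-- ===== SOURCE A (Python) =====
-- def group_lol_stats(stats):
--     grouped_vals = {}
--     for each in stats:
--         each[1] = each[1].replace(" ", "_")
--         if each[1] in grouped_vals:
--             grouped_vals[each[1]].append(each)
--         if each[1] not in grouped_vals:
--             grouped_vals[each[1]] = [each]
--     return grouped_vals
-- ===== SOURCE B (Python) =====
-- def group_lol_stats(stats):
--     # normalize all second fields first (same in-place mutation as the original)
--     for each in stats:
--         each[1] = each[1].replace(" ", "_")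
--     # distinct keys in first-occurrence order, then one filter pass per key
--     keys = []
--     for each in stats:
--         if each[1] not in keys:
--             keys.append(each[1])
--     return {k: [each for each in stats if each[1] == k] for k in keys}
-- ===== Notes on version B (the rewrite author's own statement) =====
-- stated objective: alternative
-- what changed: Replaces the single-pass dict accumulation (membership test + append/create per item) by three separate passes: normalize all items first, collect the distinct keys in first-occurrence order, then build each group with a per-key filter comprehension.
import Mathlib
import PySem

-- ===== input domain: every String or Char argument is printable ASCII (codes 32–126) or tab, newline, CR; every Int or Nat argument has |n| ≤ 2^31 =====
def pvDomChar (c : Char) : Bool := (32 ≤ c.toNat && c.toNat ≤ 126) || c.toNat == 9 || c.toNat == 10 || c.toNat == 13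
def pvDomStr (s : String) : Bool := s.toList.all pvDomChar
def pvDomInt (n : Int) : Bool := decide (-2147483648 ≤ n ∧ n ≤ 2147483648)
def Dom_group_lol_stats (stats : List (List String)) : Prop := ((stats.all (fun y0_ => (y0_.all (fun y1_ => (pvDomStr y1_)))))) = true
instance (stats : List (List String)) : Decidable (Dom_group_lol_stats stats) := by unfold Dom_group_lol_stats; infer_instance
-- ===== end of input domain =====

-- B changes the decomposition (normalize-all pass, then distinct keys in first-occurrence order, then a filter per key)
-- instead of A's one-pass dict accumulation; equivalence is about the RETURN value — both Pythons perform the same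
-- in-place mutation each[1] = each[1].replace(" ", "_") on the argument's rows.

-- ===== PORT A =====
def group_lol_stats (stats : List (List String)) : List (String × List (List String)) :=
  (stats.foldl
    (fun (d : PySem.Dict String (List (List String))) each =>
      -- each[1] = each[1].replace(" ", "_")  — List.set models the item assignment (exact for each.length ≥ 2, i.e. inside Pre_)
      let each := each.set 1 (PySem.Str.replace ((PySem.List.pyGet? each 1).getD "") " " "_")
      let k := (PySem.List.pyGet? each 1).getD ""
      let d := if d.contains k then d.modify k [] (fun v => v ++ [each]) else d
      if d.contains k then d else d.insert k [each])
    PySem.Dict.empty).items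

-- ===== PORT B =====
def group_lol_stats_alt (stats : List (List String)) : List (String × List (List String)) :=
  -- first loop: each[1] = each[1].replace(" ", "_") on every row (exact for row length ≥ 2, i.e. inside Pre_)
  let stats := stats.map (fun each => each.set 1 (PySem.Str.replace ((PySem.List.pyGet? each 1).getD "") " " "_"))
  -- second loop: distinct keys in first-occurrence order
  let keys := stats.foldl
    (fun (ks : List String) each =>
      if ks.contains ((PySem.List.pyGet? each 1).getD "") then ks
      else ks ++ [(PySem.List.pyGet? each 1).getD ""]) []
  -- dict comprehension: one filter pass per key
  keys.map (fun k => (k, stats.filter (fun each => ((PySem.List.pyGet? each 1).getD "") == k)))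

-- ===== PRECONDITION & SPEC =====
-- Pre_ excludes exactly the rows too short for each[1] (both Pythons raise IndexError there).
def Pre_group_lol_stats (stats : List (List String)) : Prop := ∀ e ∈ stats, 2 ≤ e.length
instance (stats : List (List String)) : Decidable (Pre_group_lol_stats stats) := by unfold Pre_group_lol_stats; infer_instance
def pvWitness_group_lol_stats : List (List String) := [["a", "b c"], ["x", "b_c", "z"]]
def Spec_group_lol_stats (stats : List (List String)) (out : List (String × List (List String))) : Prop := out = group_lol_stats_alt stats
instance (stats : List (List String)) (out : List (String × List (List String))) : Decidable (Spec_group_lol_stats stats out) := by unfold Spec_group_lol_stats; infer_instance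

-- ===== CLAIM (what is proved, stated in full; the proofs are below) =====
def Claim_equal_group_lol_stats : Prop := ∀ (stats : List (List String)), Dom_group_lol_stats stats → Pre_group_lol_stats stats → Spec_group_lol_stats stats (group_lol_stats stats)

-- ===== LEMMAS AND PROOFS =====

-- the normalized row and its key
def pvNorm (each : List String) : List String :=
  each.set 1 (PySem.Str.replace ((PySem.List.pyGet? each 1).getD "") " " "_")
def pvKey (each : List String) : String := (PySem.List.pyGet? each 1).getD ""

-- A's two-branch loop body is a single Dict.modify
lemma pvStep_eq (d : PySem.Dict String (List (List String))) (e : List String) :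
    (let d' := if d.contains (pvKey e) then d.modify (pvKey e) [] (fun v => v ++ [e]) else d
     if d'.contains (pvKey e) then d' else d'.insert (pvKey e) [e])
    = d.modify (pvKey e) [] (fun v => v ++ [e]) := by
  by_cases h : d.contains (pvKey e)
  · simp [h, PySem.Dict.contains_modify]
  · simp only [h, Bool.false_eq_true, if_false]
    simp [PySem.Dict.modify, PySem.Dict.getD_of_not_contains (h := by simpa using h)]

-- the modify-fold's items are the distinct keys (first-occurrence order) paired with per-key filters
lemma pvFold_items (S : List (List String)) :
    (S.foldl (fun (d : PySem.Dict String (List (List String))) e =>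
        d.modify (pvKey e) [] (fun v => v ++ [e])) PySem.Dict.empty).items
    = (PySem.Set.ofList (S.map pvKey)).map
        (fun k => (k, S.filter (fun e => pvKey e == k))) := by
  set F := S.foldl (fun (d : PySem.Dict String (List (List String))) e =>
      d.modify (pvKey e) [] (fun v => v ++ [e])) PySem.Dict.empty with hF
  have hnd : F.keys.Nodup := by
    rw [hF]; exact PySem.Dict.nodup_keys_foldl_modify_key S pvKey [] _ _ (by simp)
  rw [PySem.Dict.items_eq_map_keys F hnd []]
  have hkeys : F.keys = PySem.Set.ofList (S.map pvKey) := by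
    rw [hF, PySem.Dict.keys_foldl_modify_key]
    simp [PySem.Set.ofList_eq_foldl, PySem.Set.update, PySem.Dict.keys_empty]
  rw [hkeys]
  apply List.map_congr_left
  intro k hk
  have hgetD : F.getD k [] = S.filter (fun e => pvKey e == k) := by
    rw [hF, ← List.foldl_map (f := fun e => (pvKey e, e))
      (g := fun (d : PySem.Dict String (List (List String))) p => d.modify p.1 [] (fun v => v ++ [p.2]))]
    rw [PySem.Dict.getD_foldl_modify_append]
    simp [List.filter_map, Function.comp_def]
  rw [hgetD]

-- A's port in modify-fold form
lemma pvA_eq (stats : List (List String)) :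
    group_lol_stats stats
    = ((stats.map pvNorm).foldl
        (fun (d : PySem.Dict String (List (List String))) e => d.modify (pvKey e) [] (fun v => v ++ [e]))
        PySem.Dict.empty).items := by
  unfold group_lol_stats
  rw [List.foldl_map]
  congr 1
  apply PySem.List.foldl_congr_mem
  intro acc x _
  exact pvStep_eq acc (pvNorm x)

-- B's port in ofList/filter form
lemma pvB_eq (stats : List (List String)) :
    group_lol_stats_alt stats
    = (PySem.Set.ofList ((stats.map pvNorm).map pvKey)).map
        (fun k => (k, (stats.map pvNorm).filter (fun e => pvKey e == k))) := by
  simp only [group_lol_stats_alt]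
  rw [PySem.Set.ofList_eq_foldl]
  conv_rhs => rw [List.foldl_map, List.foldl_map]
  conv_lhs => rw [List.foldl_map]
  rfl

-- ===== VERDICT (by name: the statement is the Claim_ definition above) =====
theorem group_lol_stats_spec : Claim_equal_group_lol_stats := by
  intro stats _ _
  unfold Spec_group_lol_stats
  rw [pvA_eq, pvFold_items, pvB_eq]
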